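-- pv_equiv track=rewrite | github.com/urban7733/apexv0dev | backend/vertex_ai_pipeline.py | _calculate_severity_level
-- ===== SOURCE A (Python) =====
-- from typing import Dict, Any, List, Tuple
--
-- def _calculate_severity_level(anomalies: Dict[str, Any]) -> str:
--     """Calculate overall severity level of detected anomalies."""
--     if not anomalies:
--         return "none"
--
--     high_count = sum(1 for a in anomalies.values() if a.get('severity') == 'high')
--     medium_count = sum(1 for a in anomalies.values() if a.get('severity') == 'medium')
--
--     if high_count > 0:
--         return "high"
--     elif medium_count > 0:
--         return "medium"
--     else:
--         return "low"
-- ===== SOURCE B (Python) =====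
-- def _calculate_severity_level(anomalies):
--     """Calculate overall severity level of detected anomalies."""
--     if not anomalies:
--         return "none"
--     rank = 0
--     for a in anomalies.values():
--         s = a.get('severity')
--         rank = max(rank, 3 if s == 'high' else 2 if s == 'medium' else 1)
--     return {3: 'high', 2: 'medium', 1: 'low'}[rank]
-- ===== Notes on version B (the rewrite author's own statement) =====
-- stated objective: alternative
-- what changed: Replaced the two filtered count passes plus cascaded if/elif with a single running-max pass over a priority ranking (high=3, medium=2, other=1) translated back to a label.
import Mathlib
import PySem

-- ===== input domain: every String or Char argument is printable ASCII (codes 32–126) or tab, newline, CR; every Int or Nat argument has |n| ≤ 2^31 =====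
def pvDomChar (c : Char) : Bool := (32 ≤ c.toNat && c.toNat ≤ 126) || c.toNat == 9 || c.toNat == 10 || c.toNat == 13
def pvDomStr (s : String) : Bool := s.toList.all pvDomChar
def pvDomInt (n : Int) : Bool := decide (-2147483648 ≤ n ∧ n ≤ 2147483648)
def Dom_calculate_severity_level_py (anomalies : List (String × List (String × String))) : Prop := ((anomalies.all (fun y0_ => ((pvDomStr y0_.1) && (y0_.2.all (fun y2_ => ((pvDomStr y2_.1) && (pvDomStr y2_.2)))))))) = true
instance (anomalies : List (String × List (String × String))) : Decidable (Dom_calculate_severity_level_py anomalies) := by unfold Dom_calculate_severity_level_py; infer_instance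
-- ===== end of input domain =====

-- B replaces A's two filtered count passes + if/elif cascade by a single running-max
-- over a priority ranking (high=3, medium=2, other=1) mapped back to a label (alternative decomposition).


-- ===== PORT A =====
-- a.get('severity'): first-match lookup in the association list (None = none)
def pvGetSeverity (a : List (String × String)) : Option String :=
  (a.find? (fun p => p.1 == "severity")).map (·.2)

def calculate_severity_level_py (anomalies : List (String × List (String × String))) : String :=
  if anomalies = [] then "none"
  else
    let high_count := anomalies.foldl
      (fun acc a => if pvGetSeverity a.2 = some "high" then acc + 1 else acc) (0 : Nat)
    let medium_count := anomalies.foldl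
      (fun acc a => if pvGetSeverity a.2 = some "medium" then acc + 1 else acc) (0 : Nat)
    if high_count > 0 then "high"
    else if medium_count > 0 then "medium"
    else "low"

-- ===== PORT B =====
-- the conditional expression "3 if s=='high' else 2 if s=='medium' else 1"
def pvRank (a : List (String × String)) : Nat :=
  let s := pvGetSeverity a
  if s = some "high" then 3 else if s = some "medium" then 2 else 1

def calculate_severity_level_py_alt (anomalies : List (String × List (String × String))) : String :=
  if anomalies = [] then "none"
  else
    let rank := anomalies.foldl (fun m a => max m (pvRank a.2)) 0
    -- {3:'high', 2:'medium', 1:'low'}[rank]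
    if rank = 3 then "high" else if rank = 2 then "medium" else "low"

-- ===== PRECONDITION & SPEC =====
def Spec_calculate_severity_level_py (anomalies : List (String × List (String × String))) (out : String) : Prop := out = calculate_severity_level_py_alt anomalies
instance (anomalies : List (String × List (String × String))) (out : String) : Decidable (Spec_calculate_severity_level_py anomalies out) := by unfold Spec_calculate_severity_level_py; infer_instance

-- ===== CLAIM (what is proved, stated in full; the proofs are below) =====
def Claim_equal_calculate_severity_level_py : Prop := ∀ (anomalies : List (String × List (String × String))), Dom_calculate_severity_level_py anomalies → Spec_calculate_severity_level_py anomalies (calculate_severity_level_py anomalies)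

-- ===== LEMMAS AND PROOFS =====

-- A's counting fold is countP
theorem pv_count_fold (v : String)
    (l : List (String × List (String × String))) (n : Nat) :
    l.foldl (fun acc a => if pvGetSeverity a.2 = some v then acc + 1 else acc) n
      = n + l.countP (fun a => pvGetSeverity a.2 == some v) := by
  induction l generalizing n with
  | nil => simp
  | cons a t ih =>
    simp only [List.foldl_cons, List.countP_cons, ih]
    by_cases h : pvGetSeverity a.2 = some v <;> simp [h] <;> omega

-- B's max fold, shifted accumulator
theorem pv_max_fold (l : List (String × List (String × String))) (m : Nat) :
    l.foldl (fun m a => max m (pvRank a.2)) m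
      = max m (l.foldl (fun m a => max m (pvRank a.2)) 0) := by
  induction l generalizing m with
  | nil => simp
  | cons a t ih =>
    simp only [List.foldl_cons]
    rw [ih (max m (pvRank a.2)), ih (max 0 (pvRank a.2))]
    omega

-- characterisation of B's max fold by the two "any" tests
theorem pv_max_char (l : List (String × List (String × String))) (hne : l ≠ []) :
    l.foldl (fun m a => max m (pvRank a.2)) 0
      = (if l.any (fun a => pvGetSeverity a.2 == some "high") then 3
         else if l.any (fun a => pvGetSeverity a.2 == some "medium") then 2 else 1) := by
  induction l with
  | nil => exact absurd rfl hne
  | cons a t ih =>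
    rw [List.foldl_cons, pv_max_fold]
    by_cases ht : t = []
    · subst ht
      simp only [List.foldl_nil, List.any_cons, List.any_nil, Bool.or_false]
      unfold pvRank
      by_cases h1 : pvGetSeverity a.2 = some "high" <;>
        by_cases h2 : pvGetSeverity a.2 = some "medium" <;> simp [h1, h2]
    · rw [ih ht]
      simp only [List.any_cons]
      unfold pvRank
      by_cases h1 : pvGetSeverity a.2 = some "high" <;>
        by_cases h2 : pvGetSeverity a.2 = some "medium" <;>
          by_cases h3 : t.any (fun a => pvGetSeverity a.2 == some "high") <;>
            by_cases h4 : t.any (fun a => pvGetSeverity a.2 == some "medium") <;>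
              simp [h1, h2, h3, h4]

-- countP positivity ↔ any
theorem pv_countP_pos (p : String × List (String × String) → Bool)
    (l : List (String × List (String × String))) :
    0 < l.countP p ↔ l.any p := by
  rw [List.countP_pos_iff, List.any_eq_true]

-- ===== VERDICT (by name: the statement is the Claim_ definition above) =====
theorem calculate_severity_level_py_spec : Claim_equal_calculate_severity_level_py := by
  intro anomalies _
  unfold Spec_calculate_severity_level_py calculate_severity_level_py calculate_severity_level_py_alt
  by_cases hne : anomalies = []
  · simp [hne]
  · simp only [hne, if_false]
    rw [pv_count_fold "high", pv_count_fold "medium", Nat.zero_add, Nat.zero_add, pv_max_char _ hne]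
    have H3 := pv_countP_pos (fun a => pvGetSeverity a.2 == some "high") anomalies
    have H4 := pv_countP_pos (fun a => pvGetSeverity a.2 == some "medium") anomalies
    by_cases h3 : anomalies.any (fun a => pvGetSeverity a.2 == some "high") <;>
      by_cases h4 : anomalies.any (fun a => pvGetSeverity a.2 == some "medium") <;>
        simp only [gt_iff_lt, H3, H4, h3, h4] <;> simp
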